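-- pv_equiv track=rewrite | github.com/Crazylqx/cardgame | qxsite/cardgame/cardtype.py | get_double_dragon_val
-- ===== SOURCE A (Python) =====
-- def get_dragon_next(point):
--     if point > 2 and point < 13:
--         return point + 1
--     elif point == 13:
--         return 1
--     else:
--         return -1   # 连不下去了
--
-- def get_double_dragon_val(pt):
--     if len(pt) % 2 == 1:
--         return
--     v = pt[0]
--     for i, val in enumerate(pt):
--         if val != v:
--             return
--         if i % 2 == 1:
--             v = get_dragon_next(v)
--     return pt[0]
-- ===== SOURCE B (Python) =====
-- def get_dragon_next(point):
--     if point > 2 and point < 13: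
--         return point + 1
--     elif point == 13:
--         return 1
--     else:
--         return -1
--
--
-- def get_double_dragon_val(pt):
--     # construct the full expected double-dragon sequence, then compare once
--     if len(pt) % 2 == 1 or not pt:
--         return None
--     v = pt[0]
--     expected = []
--     while len(expected) < len(pt):
--         expected.append(v)
--         expected.append(v)
--         v = get_dragon_next(v)
--     return pt[0] if pt == expected else None
-- ===== Notes on version B (the rewrite author's own statement) =====
-- stated objective: alternative
-- what changed: Replaces A's element-by-element scan with a rolling expected value and early exit by materializing the whole expected double-dragon sequence from the first element and comparing it to the input in one equality check; B returns None on the empty list where A raises IndexError (excluded by Pre_).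
import Mathlib
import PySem

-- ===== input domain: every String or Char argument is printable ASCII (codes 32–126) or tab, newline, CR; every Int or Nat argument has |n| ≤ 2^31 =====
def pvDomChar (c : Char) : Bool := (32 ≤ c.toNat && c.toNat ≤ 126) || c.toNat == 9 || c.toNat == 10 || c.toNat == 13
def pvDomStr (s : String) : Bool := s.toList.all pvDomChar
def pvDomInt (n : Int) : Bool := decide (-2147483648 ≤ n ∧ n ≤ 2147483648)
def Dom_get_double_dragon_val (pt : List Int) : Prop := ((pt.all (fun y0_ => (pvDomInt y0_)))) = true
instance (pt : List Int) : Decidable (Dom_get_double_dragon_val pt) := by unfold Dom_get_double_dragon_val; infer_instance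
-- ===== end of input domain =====

-- B replaces A's early-exit scan with construct-the-expected-sequence-then-compare; equal returns
-- everywhere A returns (Pre_ excludes only the empty list, where A raises IndexError).

-- ===== PORT A =====
def get_dragon_next (point : Int) : Int :=
  if point > 2 ∧ point < 13 then point + 1
  else if point = 13 then 1
  else -1   -- 连不下去了

-- the 'for i, val in enumerate(pt)' loop of A, index carried as a natural counter
def dragonLoopA (pt : List Int) (xs : List Int) (i : Nat) (v : Int) : Option Int :=
  match xs with
  | [] => PySem.List.pyGet? pt 0           -- fell through the loop: return pt[0]
  | val :: rest =>
      if val ≠ v then none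
      else dragonLoopA pt rest (i + 1) (if i % 2 = 1 then get_dragon_next v else v)

def get_double_dragon_val (pt : List Int) : Option Int :=
  if pt.length % 2 = 1 then none
  else
    match PySem.List.pyGet? pt 0 with     -- v = pt[0]  (none = IndexError, excluded by Pre_)
    | none => none
    | some v => dragonLoopA pt pt 0 v

-- ===== PORT B =====
-- the 'while len(expected) < len(pt)' loop of B: k = number of slots still to fill
def buildExpected (k : Nat) (v : Int) : List Int :=
  if h : k = 0 then []
  else v :: v :: buildExpected (k - 2) (get_dragon_next v)
  termination_by k
  decreasing_by omega

def get_double_dragon_val_alt (pt : List Int) : Option Int :=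
  if pt.length % 2 = 1 ∨ pt = [] then none
  else
    match pt with
    | [] => none
    | v :: _ =>
        if pt = buildExpected pt.length v then some v else none

-- ===== PRECONDITION & SPEC =====
-- A raises IndexError reading the first element on the empty list; Pre_ excludes exactly that input.
def Pre_get_double_dragon_val (pt : List Int) : Prop := pt ≠ []
instance (pt : List Int) : Decidable (Pre_get_double_dragon_val pt) := by
  unfold Pre_get_double_dragon_val; infer_instance
def pvWitness_get_double_dragon_val : List Int := [3, 3, 4, 4]

def Spec_get_double_dragon_val (pt : List Int) (out : Option Int) : Prop := out = get_double_dragon_val_alt pt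
instance (pt : List Int) (out : Option Int) : Decidable (Spec_get_double_dragon_val pt out) := by unfold Spec_get_double_dragon_val; infer_instance

-- ===== CLAIM (what is proved, stated in full; the proofs are below) =====
def Claim_equal_get_double_dragon_val : Prop := ∀ (pt : List Int), Dom_get_double_dragon_val pt → Pre_get_double_dragon_val pt → Spec_get_double_dragon_val pt (get_double_dragon_val pt)

-- ===== LEMMAS AND PROOFS =====

theorem buildExpected_zero (v : Int) : buildExpected 0 v = [] := by
  simp [buildExpected]

theorem buildExpected_succ2 (n : Nat) (v : Int) :
    buildExpected (n + 2) v = v :: v :: buildExpected n (get_dragon_next v) := by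
  rw [buildExpected]; simp

-- A's scan over an even-length suffix starting at an even index equals
-- comparing that suffix against the materialized expected sequence.
theorem dragonLoopA_eq (pt : List Int) :
    ∀ (n : Nat) (xs : List Int), xs.length = 2 * n → ∀ (i : Nat), i % 2 = 0 → ∀ (v : Int),
      dragonLoopA pt xs i v =
        if xs = buildExpected xs.length v then PySem.List.pyGet? pt 0 else none := by
  intro n
  induction n with
  | zero =>
      intro xs hxs i hi v
      have : xs = [] := List.length_eq_zero_iff.mp (by omega)
      subst this
      simp [dragonLoopA, buildExpected_zero]
  | succ m ih =>
      intro xs hxs i hi v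
      match xs with
      | [] => simp at hxs
      | [a] => simp at hxs; omega
      | a :: b :: rest =>
        have hrest : rest.length = 2 * m := by simp at hxs; omega
        have h1 : (i + 1) % 2 = 1 := by omega
        have h2 : (i + 2) % 2 = 0 := by omega
        have hlen : (a :: b :: rest).length = rest.length + 2 := by simp
        rw [hlen, buildExpected_succ2]
        rw [dragonLoopA]
        by_cases hav : a = v
        · subst hav
          rw [if_neg (by simp : ¬ (a ≠ a)), if_neg (by omega : ¬ i % 2 = 1)]
          rw [dragonLoopA]
          by_cases hbv : b = a
          · subst hbv
            rw [if_neg (by simp : ¬ (b ≠ b)), if_pos h1]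
            have : i + 1 + 1 = i + 2 := rfl
            rw [this, ih rest hrest (i + 2) h2 (get_dragon_next b)]
            by_cases hr : rest = buildExpected rest.length (get_dragon_next b)
            · rw [if_pos hr, if_pos (by rw [← hr])]
            · rw [if_neg hr, if_neg (by intro h; injection h with _ h; injection h with _ h; exact hr h)]
          · rw [if_pos (by exact hbv : b ≠ a)]
            rw [if_neg (by intro h; injection h with _ h; injection h with h _; exact hbv h)]
        · rw [if_pos (by exact hav : a ≠ v)]
          rw [if_neg (by intro h; injection h with h _; exact hav h)]

-- ===== VERDICT (by name: the statement is the Claim_ definition above) =====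
theorem get_double_dragon_val_spec : Claim_equal_get_double_dragon_val := by
  intro pt _ hpre
  unfold Spec_get_double_dragon_val
  obtain ⟨v, rest, rfl⟩ : ∃ v rest, pt = v :: rest := by
    cases pt with
    | nil => exact absurd rfl hpre
    | cons v rest => exact ⟨v, rest, rfl⟩
  have hget : PySem.List.pyGet? (v :: rest) 0 = some v := by
    simp [PySem.List.pyGet?, PySem.List.pyIdx?]
  by_cases hodd : (v :: rest).length % 2 = 1
  · unfold get_double_dragon_val get_double_dragon_val_alt
    rw [if_pos hodd, if_pos (Or.inl hodd)]
  · obtain ⟨n, hn⟩ : ∃ n, (v :: rest).length = 2 * n := by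
      rcases Nat.mod_two_eq_zero_or_one (v :: rest).length with h | h
      · exact ⟨(v :: rest).length / 2, by omega⟩
      · exact absurd h hodd
    unfold get_double_dragon_val get_double_dragon_val_alt
    rw [if_neg hodd, if_neg (by rintro (h | h); exacts [hodd h, by simp at h])]
    simp only [hget]
    rw [dragonLoopA_eq (v :: rest) n (v :: rest) hn 0 rfl v, hget]
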